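-- pv_equiv track=rewrite | github.com/Vosec/KAS | huffman/huff.py | msgToByte
-- ===== SOURCE A (Python) =====
-- def msgToByte(compressed):
--     """Padding, pridani 0 na konec v pripade nebytove zpravy"""
--     count = 0
--     if((len(compressed))%8 == 0):
--         return compressed, count
--     else:
--         while((len(compressed))%8 != 0):
--             compressed += "0"
--             count += 1
--     return compressed, count
-- ===== SOURCE B (Python) =====
-- def msgToByte(compressed):
--     """Padding: closed-form count of zero bits to reach a byte boundary."""
--     count = (-len(compressed)) % 8
--     return compressed + "0" * count, count
-- ===== Notes on version B (the rewrite author's own statement) =====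
-- stated objective: simpler
-- what changed: Replaces the append-one-'0'-at-a-time while loop with a closed-form count = (-len) % 8 and a single string concatenation.
import Mathlib
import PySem

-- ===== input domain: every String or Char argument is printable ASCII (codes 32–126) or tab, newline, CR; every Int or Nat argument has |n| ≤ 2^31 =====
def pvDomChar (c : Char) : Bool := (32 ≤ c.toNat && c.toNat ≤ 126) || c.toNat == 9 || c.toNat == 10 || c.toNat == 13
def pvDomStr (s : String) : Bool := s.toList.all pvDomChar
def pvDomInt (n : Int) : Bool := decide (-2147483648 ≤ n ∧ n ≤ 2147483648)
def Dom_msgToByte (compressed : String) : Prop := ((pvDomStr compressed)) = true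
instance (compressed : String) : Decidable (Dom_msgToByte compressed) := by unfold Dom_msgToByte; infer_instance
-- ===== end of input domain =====

-- B replaces A's append-one-'0'-at-a-time loop with a closed-form pad count (-len) % 8; return value only, no mutation.

-- ===== PORT A =====
-- the while loop: append '0' and bump count until length is a multiple of 8
def msgToByteLoop (s : List Char) (count : Int) : List Char × Int :=
  if s.length % 8 ≠ 0 then msgToByteLoop (s ++ ['0']) (count + 1) else (s, count)
termination_by (8 - s.length % 8) % 8
decreasing_by
  simp only [List.length_append, List.length_cons, List.length_nil]
  omega

def msgToByte (compressed : String) : String × Int :=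
  let count : Int := 0
  if compressed.toList.length % 8 == 0 then (compressed, count)
  else
    let (l, c) := msgToByteLoop compressed.toList count
    (String.ofList l, c)

-- ===== PORT B =====
def msgToByte_alt (compressed : String) : String × Int :=
  let count : Int := PySem.Int.mod (-(compressed.toList.length : Int)) 8
  (String.ofList (compressed.toList ++ List.replicate count.toNat '0'), count)

-- ===== PRECONDITION & SPEC =====
def Spec_msgToByte (compressed : String) (out : String × Int) : Prop := out = msgToByte_alt compressed
instance (compressed : String) (out : String × Int) : Decidable (Spec_msgToByte compressed out) := by unfold Spec_msgToByte; infer_instance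

-- ===== CLAIM (what is proved, stated in full; the proofs are below) =====
def Claim_equal_msgToByte : Prop := ∀ (compressed : String), Dom_msgToByte compressed → Spec_msgToByte compressed (msgToByte compressed)

-- ===== LEMMAS AND PROOFS =====

-- loop characterisation: it appends exactly (8 - len % 8) % 8 zeros
theorem msgToByteLoop_eq (k : Nat) : ∀ (s : List Char) (c : Int),
    (8 - s.length % 8) % 8 = k →
    msgToByteLoop s c = (s ++ List.replicate k '0', c + (k : Int)) := by
  induction k with
  | zero =>
    intro s c hk
    rw [msgToByteLoop]
    have h0 : s.length % 8 = 0 := by omega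
    simp [h0]
  | succ k ih =>
    intro s c hk
    rw [msgToByteLoop]
    have hne : s.length % 8 ≠ 0 := by omega
    simp only [hne, ne_eq, not_false_eq_true, if_true]
    rw [ih (s ++ ['0']) (c + 1) (by simp; omega)]
    simp [List.replicate_succ, List.append_assoc]
    ring

theorem mod_pad (n : Nat) :
    PySem.Int.mod (-(n : Int)) 8 = (((8 - n % 8) % 8 : Nat) : Int) := by
  rw [PySem.Int.mod_eq_emod_of_pos (by norm_num)]
  omega

-- ===== VERDICT (by name: the statement is the Claim_ definition above) =====
theorem msgToByte_spec : Claim_equal_msgToByte := by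
  intro compressed _
  unfold Spec_msgToByte msgToByte msgToByte_alt
  set s := compressed.toList with hs
  rw [mod_pad]
  set k : Nat := (8 - s.length % 8) % 8 with hk
  by_cases h0 : s.length % 8 = 0
  · have : k = 0 := by omega
    simp only [h0, this, beq_self_eq_true, if_true, Int.toNat_natCast,
      List.replicate_zero, List.append_nil]
    exact Prod.ext (by simp [hs]) rfl
  · have hb : (s.length % 8 == 0) = false := by simpa using h0
    simp only [hb, Bool.false_eq_true, if_false]
    rw [msgToByteLoop_eq k s 0 rfl]
    simp [String.ofList]
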